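-- pv_equiv track=rewrite | github.com/sou553/mj_pygame | yaku_sub.py | toitoi_sub
-- ===== SOURCE A (Python) =====
-- import copy
--
-- def toitoi_sub(tehai):
--     tehai_m = copy.deepcopy(tehai[0])
--     tehai_n = copy.deepcopy(tehai[1])
--     tehai_m.sort()
--     atama = 0
--     while len(tehai_m) > 0:
--         if len(tehai_m) > 2:
--             if tehai_m[0] == tehai_m[1] and tehai_m[1] == tehai_m[2]:
--                 for _ in range(3):
--                     tehai_m.pop(0)
--             elif tehai_m[0] == tehai_m[1] and atama == 0:
--                 for _ in range(2):
--                     tehai_m.pop(0)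
--                 atama = 1
--             else:
--                 return False
--         elif len(tehai_m) == 2:
--             if tehai_m[0] == tehai_m[1] and atama == 0:
--                 for _ in range(2):
--                     tehai_m.pop(0)
--                 atama = 1
--             else:
--                 return False
--         else:
--             return False
--     while len(tehai_n) > 0 and tehai_n != [0]:
--         if tehai_n[0] >= 100:
--             for _ in range(4):
--                 tehai_n.pop(0)
--         elif tehai_n[0] == tehai_n[1] and tehai_n[1] == tehai_n[2]:
--             for _ in range(3):
--                 tehai_n.pop(0)
--         else:
--             return False
--     return True
-- ===== SOURCE B (Python) =====
-- import copy
--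
-- def toitoi_sub(tehai):
--     # frequency count of tehai[0] instead of A's sort-and-greedy-pop scan
--     counts = {}
--     for t in tehai[0]:
--         counts[t] = counts.get(t, 0) + 1
--     if any(c % 3 == 1 for c in counts.values()):
--         return False
--     if sum(1 for c in counts.values() if c % 3 == 2) > 1:
--         return False
--     tehai_n = copy.deepcopy(tehai[1])
--     while len(tehai_n) > 0 and tehai_n != [0]:
--         if tehai_n[0] >= 100:
--             for _ in range(4):
--                 tehai_n.pop(0)
--         elif tehai_n[0] == tehai_n[1] and tehai_n[1] == tehai_n[2]:
--             for _ in range(3):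
--                 tehai_n.pop(0)
--         else:
--             return False
--     return True
-- ===== Notes on version B (the rewrite author's own statement) =====
-- stated objective: idiomatic
-- what changed: The sort-then-greedy-pop validation of tehai[0] is replaced by a single-pass frequency dictionary with a mod-3 test on the counts (no count may be 1 mod 3, at most one count 2 mod 3); the tehai[1] meld loop is kept verbatim.
import Mathlib
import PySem

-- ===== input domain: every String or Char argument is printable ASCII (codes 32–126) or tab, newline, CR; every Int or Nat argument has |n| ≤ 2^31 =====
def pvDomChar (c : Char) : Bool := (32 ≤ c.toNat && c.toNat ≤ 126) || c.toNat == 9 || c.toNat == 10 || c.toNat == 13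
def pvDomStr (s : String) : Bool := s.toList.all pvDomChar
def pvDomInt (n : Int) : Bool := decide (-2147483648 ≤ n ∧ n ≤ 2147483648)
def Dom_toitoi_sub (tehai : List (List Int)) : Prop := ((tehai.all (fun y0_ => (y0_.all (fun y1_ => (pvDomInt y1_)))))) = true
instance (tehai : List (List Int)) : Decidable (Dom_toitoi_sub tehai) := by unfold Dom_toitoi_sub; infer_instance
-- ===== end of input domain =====

-- B replaces A's sort-and-greedy-pop check of tehai[0] by a one-pass frequency dictionary with
-- a mod-3 test on the counts; the tehai[1] meld loop is kept verbatim (shared helper loopN).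
-- Equivalence is about the return value only (A mutates only its own deepcopies).

-- ===== PORT A =====
-- the tehai_n while-loop, identical in A and in B's Python (B keeps it verbatim), so shared:
-- pop(0) / tehai_n[1] out of range raise IndexError in Python (excluded by Pre_); there the
-- port takes total defaults (drop / false).
def loopN : List Int → Bool
  | [] => true
  | h :: t =>
      if h :: t = [0] then true
      else if h ≥ 100 then loopN (t.drop 3)      -- four pop(0) = drop 4 of h :: t
      else
        match t with
        | b :: rest =>
            if h = b then
              match rest with
              | c :: rest' => if b = c then loopN rest' else false
              | [] => false                       -- Python raises IndexError here
            else false                            -- `and` short-circuits: returns False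
        | [] => false                             -- Python raises IndexError here
termination_by l => l.length
decreasing_by all_goals simp [List.length_drop] <;> omega

-- A's while-loop over the sorted copy tehai_m, with the Python int flag atama
def loopM : List Int → Int → Bool
  | a :: b :: c :: rest, atama =>
      if a = b ∧ b = c then loopM rest atama
      else if a = b ∧ atama = 0 then loopM (c :: rest) 1
      else false
  | [a, b], atama => if a = b ∧ atama = 0 then loopM [] 1 else false
  | [_], _ => false
  | [], _ => true

def toitoi_sub (tehai : List (List Int)) : Bool :=
  let tehai_m := (PySem.List.pyGet? tehai 0).getD []   -- tehai[0]; IndexError if absent (excluded by Pre_)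
  let tehai_n := (PySem.List.pyGet? tehai 1).getD []   -- tehai[1]
  if loopM (PySem.List.sorted tehai_m (fun x => x) false) 0 then loopN tehai_n else false

-- ===== PORT B =====
def toitoi_sub_alt (tehai : List (List Int)) : Bool :=
  let counts : PySem.Dict Int Int :=
    ((PySem.List.pyGet? tehai 0).getD []).foldl
      (fun d t => d.insert t (d.getD t 0 + 1)) PySem.Dict.empty
  if counts.values.any (fun c => decide (PySem.Int.mod c 3 = 1)) then false
  else if ((counts.values.countP (fun c => decide (PySem.Int.mod c 3 = 2)) : Nat) : Int) > 1 then false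
  else loopN ((PySem.List.pyGet? tehai 1).getD [])

-- ===== PRECONDITION & SPEC =====
-- Pre_ excludes exactly the inputs on which Python A raises IndexError: tehai with fewer than
-- two lists, or one whose hand tehai[0] passes the all-triplets count test (stated here purely
-- by tile counts) while the meld list tehai[1] is not a well-formed block sequence (blocks of 4
-- headed by a value ≥ 100, or ≥ 3 entries with a low head, up to a trailing [0] / first mismatch).
abbrev MCond (m : List Int) : Prop :=
  (∀ k ∈ m, ¬ m.count k % 3 = 1) ∧ (m.toFinset.filter (fun k => m.count k % 3 = 2)).card ≤ 1

-- shape grammar of meld lists tehai[1] that A's loop scans without an out-of-range index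
-- (structural automaton: skip > 0 means skip so many entries of a called-meld block of 4)
def okA : List Int → Nat → Bool
  | l, Nat.succ k =>
      match l with
      | [] => false
      | _ :: t => okA t k
  | l, 0 =>
      match l with
      | [] => true
      | [x] => x == 0
      | h :: b :: t =>
          if h ≥ 100 then okA (b :: t) 3
          else if h = b then
            match t with
            | [] => false
            | c :: t' => if b = c then okA t' 0 else true
          else true

def okN (l : List Int) : Bool := okA l 0

def Pre_toitoi_sub (tehai : List (List Int)) : Prop :=
  2 ≤ tehai.length ∧ (MCond (tehai.getD 0 []) → okN (tehai.getD 1 []) = true)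
instance (tehai : List (List Int)) : Decidable (Pre_toitoi_sub tehai) := by
  unfold Pre_toitoi_sub; infer_instance

def pvWitness_toitoi_sub : List (List Int) := [[1, 1, 1, 2, 2], [0]]

def Spec_toitoi_sub (tehai : List (List Int)) (out : Bool) : Prop := out = toitoi_sub_alt tehai
instance (tehai : List (List Int)) (out : Bool) : Decidable (Spec_toitoi_sub tehai out) := by
  unfold Spec_toitoi_sub; infer_instance

-- ===== CLAIM (what is proved, stated in full; the proofs are below) =====
def Claim_equal_toitoi_sub : Prop := ∀ (tehai : List (List Int)), Dom_toitoi_sub tehai → Pre_toitoi_sub tehai → Spec_toitoi_sub tehai (toitoi_sub tehai)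

-- ===== LEMMAS AND PROOFS =====

-- number of distinct tile values whose count is ≡ 2 (mod 3)
def pairsCard (s : List Int) : Nat :=
  (s.toFinset.filter (fun k => s.count k % 3 = 2)).card

-- what A's greedy loop decides, expressed by tile counts; b = remaining pair budget
def GoodCnt (s : List Int) (b : Nat) : Prop :=
  (∀ k ∈ s, ¬ s.count k % 3 = 1) ∧ pairsCard s ≤ b

theorem count_cons3 (x : Int) (t : List Int) (k : Int) :
    (x :: x :: x :: t).count k = t.count k + (if k = x then 3 else 0) := by
  by_cases h : k = x
  · subst h; simp [List.count_cons]
  · simp [List.count_cons, h, Ne.symm h]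

theorem pairsCard_cons3 (x : Int) (t : List Int) :
    pairsCard (x :: x :: x :: t) = pairsCard t := by
  unfold pairsCard
  have hfeq : (x :: x :: x :: t).toFinset.filter (fun k => (x :: x :: x :: t).count k % 3 = 2)
      = t.toFinset.filter (fun k => t.count k % 3 = 2) := by
    ext k
    simp only [Finset.mem_filter, List.toFinset_cons, Finset.mem_insert, List.mem_toFinset,
      count_cons3 x t k]
    by_cases h : k = x
    · rw [if_pos h]
      subst h
      by_cases hx : k ∈ t
      · simp only [hx, or_true, true_and, and_true]
        omega
      · simp [hx, List.count_eq_zero.2 hx]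
    · simp [h]
  rw [hfeq]

theorem goodCnt_cons3 (x : Int) (t : List Int) (b : Nat) :
    GoodCnt (x :: x :: x :: t) b ↔ GoodCnt t b := by
  have hcard := pairsCard_cons3 x t
  constructor
  · rintro ⟨h1, h2⟩
    refine ⟨fun k hk => ?_, by rwa [hcard] at h2⟩
    have := h1 k (by simp [hk])
    rw [count_cons3 x t k] at this
    by_cases h : k = x
    · rw [if_pos h] at this; omega
    · rwa [if_neg h, Nat.add_zero] at this
  · rintro ⟨h1, h2⟩
    refine ⟨fun k _ => ?_, by rwa [hcard]⟩
    rw [count_cons3 x t k]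
    by_cases h : k = x
    · subst h
      by_cases hx : k ∈ t
      · have := h1 k hx; rw [if_pos rfl]; omega
      · simp [List.count_eq_zero.2 hx]
    · rw [if_neg h, Nat.add_zero]
      by_cases hx : k ∈ t
      · exact h1 k hx
      · simp [List.count_eq_zero.2 hx]

theorem pairsCard_pair (x : Int) (t : List Int) (hx : x ∉ t) :
    pairsCard (x :: x :: t) = pairsCard t + 1 := by
  unfold pairsCard
  have hc0 : t.count x = 0 := List.count_eq_zero.2 hx
  have hfe : (x :: x :: t).toFinset.filter (fun k => (x :: x :: t).count k % 3 = 2) =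
      insert x (t.toFinset.filter (fun k => t.count k % 3 = 2)) := by
    ext k
    simp only [Finset.mem_filter, Finset.mem_insert, List.toFinset_cons, List.mem_toFinset]
    by_cases h : k = x
    · subst h; simp [List.count_cons, hc0]
    · simp [List.count_cons, h, Ne.symm h]
  rw [hfe, Finset.card_insert_of_notMem (by simp [hx])]

theorem goodCnt_pair (x : Int) (t : List Int) (hx : x ∉ t) (b : Nat) :
    GoodCnt (x :: x :: t) (b + 1) ↔ GoodCnt t b := by
  have hc0 : t.count x = 0 := List.count_eq_zero.2 hx
  have hcnt : ∀ k : Int, k ≠ x → (x :: x :: t).count k = t.count k := by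
    intro k h; simp [List.count_cons, h, Ne.symm h]
  constructor
  · rintro ⟨h1, h2⟩
    refine ⟨fun k hk => ?_, ?_⟩
    · have hne : k ≠ x := fun h => hx (h ▸ hk)
      have := h1 k (by simp [hk]); rwa [hcnt k hne] at this
    · have := pairsCard_pair x t hx; omega
  · rintro ⟨h1, h2⟩
    refine ⟨fun k hk => ?_, ?_⟩
    · by_cases h : k = x
      · subst h; simp [List.count_cons, hc0]
      · rw [hcnt k h]
        rcases List.mem_cons.1 hk with h' | hk'
        · exact absurd h' h
        · rcases List.mem_cons.1 hk' with h' | hmem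
          · exact absurd h' h
          · exact h1 k hmem
    · have := pairsCard_pair x t hx; omega

theorem goodCnt_not_single (x : Int) (t : List Int) (hx : x ∉ t) (b : Nat) :
    ¬ GoodCnt (x :: t) b := by
  rintro ⟨h1, -⟩
  have := h1 x (by simp)
  simp [List.count_cons, List.count_eq_zero.2 hx] at this

theorem goodCnt_pair_zero (x : Int) (t : List Int) (hx : x ∉ t) :
    ¬ GoodCnt (x :: x :: t) 0 := by
  rintro ⟨-, h2⟩
  rw [pairsCard_pair x t hx] at h2; omega

-- x is not in the tail past a first different element, on a sorted list
theorem not_mem_of_pairwise (x z : Int) (rest : List Int)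
    (h : (x :: z :: rest).Pairwise (· ≤ ·)) (hne : x ≠ z) : x ∉ z :: rest := by
  rcases List.pairwise_cons.1 h with ⟨hx, h'⟩
  rcases List.pairwise_cons.1 h' with ⟨hz, -⟩
  intro hmem
  rcases List.mem_cons.1 hmem with h1 | h1
  · exact hne h1
  · exact hne (le_antisymm (hx z (by simp)) (hz x h1))

-- characterisation of A's greedy loop on a sorted list by tile counts
theorem loopM_char (s : List Int) (a : Int) (hs : s.Pairwise (· ≤ ·)) :
    loopM s a = true ↔ GoodCnt s (if a = 0 then 1 else 0) := by
  induction s, a using loopM.induct with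
  | case1 x y z rest atama heq ih =>
    obtain ⟨h1, h2⟩ := heq; subst h1; subst h2
    rw [show loopM (x :: x :: x :: rest) atama = loopM rest atama from by simp [loopM]]
    rw [ih (hs.of_cons.of_cons.of_cons)]
    exact (goodCnt_cons3 x rest _).symm
  | case2 x y z rest atama hne heq ih =>
    obtain ⟨h1, h2⟩ := heq; subst h1; subst h2
    have hza : ¬ x = z := fun h => hne ⟨rfl, h⟩
    have hxmem : x ∉ z :: rest := not_mem_of_pairwise x z rest hs.of_cons hza
    rw [show loopM (x :: x :: z :: rest) 0 = loopM (z :: rest) 1 from by simp [loopM, hza]]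
    rw [ih (hs.of_cons.of_cons)]
    rw [if_pos rfl, if_neg (by norm_num : ¬ ((1 : Int) = 0))]
    exact (goodCnt_pair x (z :: rest) hxmem 0).symm
  | case3 x y z rest atama hne hne2 =>
    rw [show loopM (x :: y :: z :: rest) atama = false from by simp [loopM, hne, hne2]]
    simp only [Bool.false_eq_true, false_iff]
    intro hg
    by_cases hxy : x = y
    · subst hxy
      have hza : ¬ (x = z) := fun h => hne ⟨rfl, h⟩
      have ha : ¬ (atama = 0) := fun h => hne2 ⟨rfl, h⟩
      have hxmem : x ∉ z :: rest := not_mem_of_pairwise x z rest hs.of_cons hza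
      rw [if_neg ha] at hg
      exact goodCnt_pair_zero x (z :: rest) hxmem hg
    · have hxmem : x ∉ y :: z :: rest := not_mem_of_pairwise x y (z :: rest) hs hxy
      exact goodCnt_not_single x (y :: z :: rest) hxmem _ hg
  | case4 x y atama heq =>
    obtain ⟨h1, h2⟩ := heq; subst h1; subst h2
    rw [show loopM [x, x] 0 = true from by simp [loopM]]
    rw [if_pos rfl]
    refine ⟨fun _ => (goodCnt_pair x [] (by simp) 0).mpr ⟨by simp, ?_⟩, fun _ => rfl⟩
    simp [pairsCard]
  | case5 x y atama hne =>
    rw [show loopM [x, y] atama = false from by simp [loopM, hne]]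
    simp only [Bool.false_eq_true, false_iff]
    intro hg
    by_cases hxy : x = y
    · subst hxy
      have ha : ¬ (atama = 0) := fun h => hne ⟨rfl, h⟩
      rw [if_neg ha] at hg
      exact goodCnt_pair_zero x [] (by simp) hg
    · exact goodCnt_not_single x [y] (by simp [hxy]) _ hg
  | case6 x atama =>
    rw [show loopM [x] atama = false from by simp [loopM]]
    simp only [Bool.false_eq_true, false_iff]
    exact goodCnt_not_single x [] (by simp) _
  | case7 atama =>
    rw [show loopM [] atama = true from by simp [loopM]]
    refine ⟨fun _ => ⟨by simp, ?_⟩, fun _ => rfl⟩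
    simp [pairsCard]

theorem goodCnt_perm (s t : List Int) (h : s.Perm t) (b : Nat) :
    GoodCnt s b ↔ GoodCnt t b := by
  have hcnt : ∀ k : Int, s.count k = t.count k := fun k => h.count_eq k
  have hfs : s.toFinset = t.toFinset := by ext k; simp [List.mem_toFinset, h.mem_iff]
  have hcard : pairsCard s = pairsCard t := by
    unfold pairsCard
    rw [hfs]
    congr 1
    apply Finset.filter_congr
    intro k _
    rw [hcnt k]
  constructor
  · rintro ⟨h1, h2⟩
    refine ⟨fun k hk => ?_, by rwa [hcard] at h2⟩
    rw [← hcnt k]; exact h1 k (h.mem_iff.2 hk)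
  · rintro ⟨h1, h2⟩
    refine ⟨fun k hk => ?_, by rwa [hcard]⟩
    rw [hcnt k]; exact h1 k (h.mem_iff.1 hk)

-- countP over the distinct values equals the Finset cardinality pairsCard
theorem countP_dedup_eq_pairsCard (m : List Int) :
    ((PySem.Set.ofList m).countP (fun k => decide (m.count k % 3 = 2))) = pairsCard m := by
  have hnd : (PySem.Set.ofList m).Nodup := PySem.Set.nodup_ofList m
  have hfs : (PySem.Set.ofList m).toFinset = m.toFinset := by
    ext k; simp [PySem.Set.mem_ofList]
  rw [List.countP_eq_length_filter,
      ← List.toFinset_card_of_nodup (hnd.filter _), List.toFinset_filter, hfs]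
  unfold pairsCard
  congr 1
  apply Finset.filter_congr
  intro k _
  simp

-- the two ports agree on every input (Pre_ is only needed for the Pythons not to raise)
theorem ports_eq (tehai : List (List Int)) : toitoi_sub tehai = toitoi_sub_alt tehai := by
  simp only [toitoi_sub, toitoi_sub_alt]
  set m := (PySem.List.pyGet? tehai 0).getD [] with hm
  set n := (PySem.List.pyGet? tehai 1).getD [] with hn
  have hvals : (List.foldl (fun d t => d.insert t (d.getD t 0 + 1))
      (PySem.Dict.empty : PySem.Dict Int Int) m).values =
      (PySem.Set.ofList m).map (fun k => ((m.count k : Nat) : Int)) := by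
    rw [PySem.Dict.foldl_insert_getD_add_one_eq_counter]
    show (PySem.Dict.counter m).items.map Prod.snd = _
    rw [PySem.Dict.items_counter]
    simp [List.map_map, Function.comp]
  rw [hvals]
  have hmod : ∀ cnt : Nat, PySem.Int.mod ((cnt : Nat) : Int) 3 = ((cnt % 3 : Nat) : Int) := by
    intro cnt; exact_mod_cast PySem.Int.mod_natCast cnt 3
  have hcountP : (((PySem.Set.ofList m).map (fun k => ((m.count k : Nat) : Int))).countP
      (fun c => decide (PySem.Int.mod c 3 = 2))) = pairsCard m := by
    rw [List.countP_map, ← countP_dedup_eq_pairsCard m]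
    apply List.countP_congr
    intro k _
    simp only [Function.comp_apply, decide_eq_true_eq]
    rw [hmod (m.count k)]
    omega
  have hsorted := PySem.List.sorted_perm m (fun x => x) false
  have hpw : (PySem.List.sorted m (fun x => x) false).Pairwise (· ≤ ·) :=
    PySem.List.sorted_pairwise m (fun x => x)
  have hA := loopM_char (PySem.List.sorted m (fun x => x) false) 0 hpw
  rw [if_pos rfl, goodCnt_perm _ m hsorted 1] at hA
  by_cases hC : ∀ k ∈ m, ¬ m.count k % 3 = 1
  · have hanyP : ¬ ((((PySem.Set.ofList m).map (fun k => ((m.count k : Nat) : Int))).any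
        (fun c => decide (PySem.Int.mod c 3 = 1))) = true) := by
      rw [Bool.not_eq_true, List.any_eq_false]
      intro c hc
      rcases List.mem_map.1 hc with ⟨k, hk, rfl⟩
      have h1 := hC k ((PySem.Set.mem_ofList m k).1 hk)
      rw [hmod (m.count k)]
      simp only [decide_eq_true_eq]
      omega
    rw [if_neg hanyP]
    by_cases hP : pairsCard m ≤ 1
    · have hgtn : ¬ ((((((PySem.Set.ofList m).map (fun k => ((m.count k : Nat) : Int))).countP
          (fun c => decide (PySem.Int.mod c 3 = 2))) : Nat) : Int) > 1) := by
        rw [hcountP]; push_cast; omega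
      rw [if_neg hgtn]
      have hMt := hA.2 ⟨hC, hP⟩
      rw [hMt, if_pos rfl]
    · have hgt : ((((((PySem.Set.ofList m).map (fun k => ((m.count k : Nat) : Int))).countP
          (fun c => decide (PySem.Int.mod c 3 = 2))) : Nat) : Int) > 1) := by
        rw [hcountP]; push_cast; omega
      rw [if_pos hgt]
      have hMf : loopM (PySem.List.sorted m (fun x => x) false) 0 = false := by
        cases hb : loopM (PySem.List.sorted m (fun x => x) false) 0
        · rfl
        · exact absurd (hA.1 hb).2 hP
      rw [hMf, if_neg (by simp)]
  · push_neg at hC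
    rcases hC with ⟨k, hk, hk1⟩
    have hanyt : ((((PySem.Set.ofList m).map (fun k => ((m.count k : Nat) : Int))).any
        (fun c => decide (PySem.Int.mod c 3 = 1))) = true) := by
      rw [List.any_eq_true]
      refine ⟨((m.count k : Nat) : Int),
        List.mem_map.2 ⟨k, (PySem.Set.mem_ofList m k).2 hk, rfl⟩, ?_⟩
      rw [hmod (m.count k)]
      simp only [decide_eq_true_eq]
      omega
    rw [if_pos hanyt]
    have hMf : loopM (PySem.List.sorted m (fun x => x) false) 0 = false := by
      cases hb : loopM (PySem.List.sorted m (fun x => x) false) 0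
      · rfl
      · exact absurd hk1 ((hA.1 hb).1 k hk)
    rw [hMf, if_neg (by simp)]

-- ===== VERDICT (by name: the statement is the Claim_ definition above) =====
theorem toitoi_sub_spec : Claim_equal_toitoi_sub := by
  intro tehai _ _
  unfold Spec_toitoi_sub
  exact ports_eq tehai
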